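-- pv_equiv track=rewrite | github.com/Manjen1218/Parse-Engine | engine/ParseEngineData.py | findSmallestPositionAmongSustrings
-- ===== SOURCE A (Python) =====
-- def findSmallestPositionAmongSustrings(substrings, s):
--     """
--     Find the leftmost occurrence among multiple substrings.
--
--     Args:
--         substrings (list): List of strings to search for
--         s (str): String to search in
--
--     Returns:
--         tuple: (position, found_substring) or (-1, None) if not found
--     """
--     if not substrings or not s:
--         return (-1, None)
--
--     min_pos = float('inf')
--     found_substring = None
--
--     for sub in substrings:
--         if not sub:
--             continue
--
--         pos = s.find(sub)
--         if pos != -1 and pos < min_pos: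
--             min_pos = pos
--             found_substring = sub
--             if pos == 0:
--                 break
--
--     return (int(min_pos), found_substring) if found_substring else (-1, None)
-- ===== SOURCE B (Python) =====
-- def findSmallestPositionAmongSustrings(substrings, s):
--     """Leftmost occurrence among substrings: scan s position by position and
--     return the first position where some (non-empty) candidate matches,
--     taking the earliest candidate in list order at that position."""
--     subs = [sub for sub in substrings if sub]
--     for i in range(len(s)):
--         for sub in subs:
--             if s.startswith(sub, i):
--                 return (i, sub)
--     return (-1, None)
-- ===== Notes on version B (the rewrite author's own statement) =====
-- stated objective: faster
-- what changed: A computes s.find(sub) over the whole string for every candidate and folds a running minimum with an early break; B filters the non-empty candidates once, then scans the positions of s left to right and returns at the first position where some candidate matches (earliest candidate in list order), so no per-candidate full-string search or minimum tracking remains.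
import Mathlib
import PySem

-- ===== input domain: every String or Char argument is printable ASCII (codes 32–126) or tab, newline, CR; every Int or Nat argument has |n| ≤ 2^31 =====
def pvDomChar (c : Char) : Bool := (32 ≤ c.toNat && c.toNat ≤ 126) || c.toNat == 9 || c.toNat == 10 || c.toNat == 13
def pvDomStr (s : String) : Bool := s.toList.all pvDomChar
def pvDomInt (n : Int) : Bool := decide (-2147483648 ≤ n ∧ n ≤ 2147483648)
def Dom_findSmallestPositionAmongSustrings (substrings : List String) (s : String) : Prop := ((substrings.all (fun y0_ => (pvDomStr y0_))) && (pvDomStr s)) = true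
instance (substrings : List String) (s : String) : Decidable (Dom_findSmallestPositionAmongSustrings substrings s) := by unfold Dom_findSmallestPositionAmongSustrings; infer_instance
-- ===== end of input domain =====

-- B replaces A's per-pattern s.find() minimum with a single left-to-right scan of the
-- positions of s, returning at the first position where some candidate matches
-- (objective: different, measured-faster algorithm; same result incl. list-order tiebreak).

-- ===== PORT A =====
-- A's loop state: (min_pos, found_substring); min_pos = none represents float('inf')
-- (any pos ≠ -1 compares below it).  'break' at pos == 0 returns the state at once.
def pvLtInf (pos : Int) : Option Int → Bool
  | none => true            -- 'pos < float("inf")'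
  | some m => pos < m

def pvALoop (cs : List Char) : List String → Option Int × Option String → Option Int × Option String
  | [], st => st
  | sub :: rest, st =>
    if sub.toList.isEmpty then pvALoop cs rest st     -- 'if not sub: continue'
    else
      let pos := PySem.Chars.find cs sub.toList
      if (!(pos == -1)) && pvLtInf pos st.1 then
        if pos == 0 then (some pos, some sub)         -- 'break'
        else pvALoop cs rest (some pos, some sub)
      else pvALoop cs rest st

def findSmallestPositionAmongSustrings (substrings : List String) (s : String) : Int × Option String :=
  if substrings.isEmpty || s.toList.isEmpty then (-1, none)
  else
    -- '(int(min_pos), found_substring) if found_substring else (-1, None)';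
    -- whenever found_substring is set, min_pos is a finite position (set together).
    match pvALoop s.toList substrings (none, none) with
    | (some m, some f) => (m, some f)
    | _ => (-1, none)

-- ===== PORT B =====
-- inner loop of Source B: first candidate that matches at the current position
def pvBInner (t : List Char) : List String → Option String
  | [] => none
  | sub :: rest =>
    -- s.startswith(sub, i) with t = s[i:] dropped char list: exact for 0 ≤ i ≤ len(s)
    if PySem.Chars.startswith t sub.toList then some sub else pvBInner t rest

-- outer loop of Source B: 'for i in range(len(s))', t is the suffix s[i:]
def pvBScan (subs : List String) : Nat → List Char → Int × Option String
  | _, [] => (-1, none)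
  | i, c :: rest =>
    match pvBInner (c :: rest) subs with
    | some sub => ((i : Int), some sub)
    | none => pvBScan subs (i + 1) rest

def findSmallestPositionAmongSustrings_alt (substrings : List String) (s : String) : Int × Option String :=
  pvBScan (substrings.filter (fun x => !x.toList.isEmpty)) 0 s.toList

-- ===== PRECONDITION & SPEC =====
def Spec_findSmallestPositionAmongSustrings (substrings : List String) (s : String) (out : Int × Option String) : Prop := out = findSmallestPositionAmongSustrings_alt substrings s
instance (substrings : List String) (s : String) (out : Int × Option String) : Decidable (Spec_findSmallestPositionAmongSustrings substrings s out) := by unfold Spec_findSmallestPositionAmongSustrings; infer_instance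

-- ===== CLAIM (what is proved, stated in full; the proofs are below) =====
def Claim_equal_findSmallestPositionAmongSustrings : Prop := ∀ (substrings : List String) (s : String), Dom_findSmallestPositionAmongSustrings substrings s → Spec_findSmallestPositionAmongSustrings substrings s (findSmallestPositionAmongSustrings substrings s)

-- ===== LEMMAS AND PROOFS =====

-- reference function: minimum find-position with earliest-in-list tiebreak
def pvMin (cs : List Char) : List String → Option (Int × String)
  | [] => none
  | sub :: rest =>
    let r := pvMin cs rest
    if sub.toList.isEmpty then r
    else
      let p := PySem.Chars.find cs sub.toList
      if p = -1 then r
      else match r with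
        | none => some (p, sub)
        | some (q, t) => if p ≤ q then some (p, sub) else some (q, t)

theorem pvMin_cons_empty (cs : List Char) (sub : String) (rest : List String)
    (h : sub.toList.isEmpty = true) : pvMin cs (sub :: rest) = pvMin cs rest := by
  simp [pvMin, h]

theorem pvMin_cons_notfound (cs : List Char) (sub : String) (rest : List String)
    (h1 : ¬ sub.toList.isEmpty = true) (h2 : PySem.Chars.find cs sub.toList = -1) :
    pvMin cs (sub :: rest) = pvMin cs rest := by
  simp [pvMin, h1, h2]

theorem pvMin_cons_found (cs : List Char) (sub : String) (rest : List String)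
    (h1 : ¬ sub.toList.isEmpty = true) (h2 : ¬ PySem.Chars.find cs sub.toList = -1) :
    pvMin cs (sub :: rest) =
      (match pvMin cs rest with
       | none => some (PySem.Chars.find cs sub.toList, sub)
       | some (q, t) => if PySem.Chars.find cs sub.toList ≤ q
           then some (PySem.Chars.find cs sub.toList, sub) else some (q, t)) := by
  simp [pvMin, h1, h2]

theorem pvMin_nonneg (cs : List Char) (L : List String) : ∀ (q : Int) (t : String),
    pvMin cs L = some (q, t) → 0 ≤ q := by
  induction L with
  | nil => intro q t h; simp [pvMin] at h
  | cons sub rest ih =>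
    intro q t h
    simp only [pvMin] at h
    split_ifs at h with h1 h2
    · exact ih _ _ h
    · exact ih _ _ h
    · rcases hr : pvMin cs rest with _ | ⟨q', t'⟩ <;> rw [hr] at h
      · simp at h
        have := PySem.Chars.neg_one_le_find cs sub.toList
        omega
      · have hq' := ih _ _ hr
        have hb := PySem.Chars.neg_one_le_find cs sub.toList
        simp at h
        split_ifs at h <;> simp at h <;> omega

theorem pvALoop_cons_skip (cs : List Char) (sub : String) (rest : List String)
    (st : Option Int × Option String) (h : sub.toList.isEmpty = true) :
    pvALoop cs (sub :: rest) st = pvALoop cs rest st := by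
  simp only [pvALoop]
  rw [if_pos h]

theorem pvALoop_cons_noimp (cs : List Char) (sub : String) (rest : List String)
    (st : Option Int × Option String) (h1 : ¬ sub.toList.isEmpty = true)
    (hc : ((!(PySem.Chars.find cs sub.toList == -1)) &&
            pvLtInf (PySem.Chars.find cs sub.toList) st.1) = false) :
    pvALoop cs (sub :: rest) st = pvALoop cs rest st := by
  simp only [pvALoop]
  rw [if_neg h1, if_neg (ne_true_of_eq_false hc)]

theorem pvALoop_cons_imp_zero (cs : List Char) (sub : String) (rest : List String)
    (st : Option Int × Option String) (h1 : ¬ sub.toList.isEmpty = true)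
    (hc : ((!(PySem.Chars.find cs sub.toList == -1)) &&
            pvLtInf (PySem.Chars.find cs sub.toList) st.1) = true)
    (h0 : PySem.Chars.find cs sub.toList = 0) :
    pvALoop cs (sub :: rest) st = (some 0, some sub) := by
  simp only [pvALoop]
  rw [if_neg h1, if_pos hc,
    if_pos (show (PySem.Chars.find cs sub.toList == 0) = true by simp [h0]), h0]

theorem pvALoop_cons_imp_pos (cs : List Char) (sub : String) (rest : List String)
    (st : Option Int × Option String) (h1 : ¬ sub.toList.isEmpty = true)
    (hc : ((!(PySem.Chars.find cs sub.toList == -1)) &&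
            pvLtInf (PySem.Chars.find cs sub.toList) st.1) = true)
    (h0 : ¬ PySem.Chars.find cs sub.toList = 0) :
    pvALoop cs (sub :: rest) st =
      pvALoop cs rest (some (PySem.Chars.find cs sub.toList), some sub) := by
  simp only [pvALoop]
  rw [if_neg h1, if_pos hc,
    if_neg (show ¬ (PySem.Chars.find cs sub.toList == 0) = true by simp [h0])]

theorem pvALoop_gen (cs : List Char) (L : List String) :
    ∀ (q : Int) (t : String), 0 < q →
    pvALoop cs L (some q, some t) =
      (match pvMin cs L with
       | some (q', t') => if q' < q then (some q', some t') else (some q, some t)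
       | none => (some q, some t)) := by
  induction L with
  | nil => intro q t hq; simp [pvALoop, pvMin]
  | cons sub rest ih =>
    intro q t hq
    by_cases h1 : sub.toList.isEmpty = true
    · rw [pvMin_cons_empty cs sub rest h1, pvALoop_cons_skip cs sub rest _ h1]
      exact ih q t hq
    · by_cases h2 : PySem.Chars.find cs sub.toList = -1
      · rw [pvMin_cons_notfound cs sub rest h1 h2,
          pvALoop_cons_noimp cs sub rest _ h1 (by simp [h2])]
        exact ih q t hq
      · have hp0 : 0 ≤ PySem.Chars.find cs sub.toList := by
          have := PySem.Chars.neg_one_le_find cs sub.toList; omega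
        rw [pvMin_cons_found cs sub rest h1 h2]
        by_cases h3 : PySem.Chars.find cs sub.toList < q
        · have hc : ((!(PySem.Chars.find cs sub.toList == -1)) &&
              pvLtInf (PySem.Chars.find cs sub.toList)
                ((some q, some t) : Option Int × Option String).1) = true := by
            simp [pvLtInf, h2, h3]
          by_cases h4 : PySem.Chars.find cs sub.toList = 0
          · rw [pvALoop_cons_imp_zero cs sub rest _ h1 hc h4]
            rcases hr : pvMin cs rest with _ | ⟨q', t'⟩
            · dsimp only
              rw [if_pos h3, h4]
            · have hq' := pvMin_nonneg cs rest q' t' hr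
              dsimp only
              rw [if_pos (show PySem.Chars.find cs sub.toList ≤ q' by omega)]
              dsimp only
              rw [if_pos h3, h4]
          · rw [pvALoop_cons_imp_pos cs sub rest _ h1 hc h4]
            rw [ih (PySem.Chars.find cs sub.toList) sub (by omega)]
            rcases hr : pvMin cs rest with _ | ⟨q', t'⟩
            · dsimp only
              rw [if_pos h3]
            · dsimp only
              by_cases h5 : PySem.Chars.find cs sub.toList ≤ q'
              · rw [if_pos h5]
                dsimp only
                rw [if_neg (show ¬ q' < PySem.Chars.find cs sub.toList by omega), if_pos h3]
              · rw [if_neg h5]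
                dsimp only
                rw [if_pos (show q' < PySem.Chars.find cs sub.toList by omega),
                  if_pos (show q' < q by omega)]
        · rw [pvALoop_cons_noimp cs sub rest _ h1 (by simp [pvLtInf, h3])]
          rw [ih q t hq]
          rcases hr : pvMin cs rest with _ | ⟨q', t'⟩
          · dsimp only
            rw [if_neg (show ¬ PySem.Chars.find cs sub.toList < q by omega)]
          · dsimp only
            by_cases h5 : PySem.Chars.find cs sub.toList ≤ q'
            · rw [if_pos h5]
              dsimp only
              rw [if_neg (show ¬ PySem.Chars.find cs sub.toList < q by omega),
                if_neg (show ¬ q' < q by omega)]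
            · rw [if_neg h5]

theorem pvALoop_start (cs : List Char) (L : List String) :
    pvALoop cs L (none, none) =
      (match pvMin cs L with
       | some (q, t) => (some q, some t)
       | none => (none, none)) := by
  induction L with
  | nil => simp [pvALoop, pvMin]
  | cons sub rest ih =>
    by_cases h1 : sub.toList.isEmpty = true
    · rw [pvMin_cons_empty cs sub rest h1, pvALoop_cons_skip cs sub rest _ h1]
      exact ih
    · by_cases h2 : PySem.Chars.find cs sub.toList = -1
      · rw [pvMin_cons_notfound cs sub rest h1 h2,
          pvALoop_cons_noimp cs sub rest _ h1 (by simp [h2])]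
        exact ih
      · have hp0 : 0 ≤ PySem.Chars.find cs sub.toList := by
          have := PySem.Chars.neg_one_le_find cs sub.toList; omega
        rw [pvMin_cons_found cs sub rest h1 h2]
        have hc : ((!(PySem.Chars.find cs sub.toList == -1)) &&
            pvLtInf (PySem.Chars.find cs sub.toList)
              ((none, none) : Option Int × Option String).1) = true := by
          simp [pvLtInf, h2]
        by_cases h4 : PySem.Chars.find cs sub.toList = 0
        · rw [pvALoop_cons_imp_zero cs sub rest _ h1 hc h4]
          rcases hr : pvMin cs rest with _ | ⟨q', t'⟩
          · dsimp only
            rw [h4]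
          · have hq' := pvMin_nonneg cs rest q' t' hr
            dsimp only
            rw [if_pos (show PySem.Chars.find cs sub.toList ≤ q' by omega), h4]
        · rw [pvALoop_cons_imp_pos cs sub rest _ h1 hc h4]
          rw [pvALoop_gen cs rest (PySem.Chars.find cs sub.toList) sub (by omega)]
          rcases hr : pvMin cs rest with _ | ⟨q', t'⟩
          · rfl
          · dsimp only
            by_cases h5 : PySem.Chars.find cs sub.toList ≤ q'
            · rw [if_pos h5]
              dsimp only
              rw [if_neg (show ¬ q' < PySem.Chars.find cs sub.toList by omega)]
            · rw [if_neg h5]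
              dsimp only
              rw [if_pos (show q' < PySem.Chars.find cs sub.toList by omega)]

-- B inner loop characterisations
theorem pvBInner_eq_none (t : List Char) (L : List String)
    (h : ∀ sub ∈ L, ¬ sub.toList <+: t) : pvBInner t L = none := by
  induction L with
  | nil => rfl
  | cons sub rest ih =>
    simp only [pvBInner]
    rw [if_neg, ih (fun x hx => h x (by simp [hx]))]
    simp [PySem.Chars.startswith_iff]
    exact h sub (by simp)

theorem pvBInner_first (t : List Char) (L1 L2 : List String) (u : String)
    (h1 : ∀ sub ∈ L1, ¬ sub.toList <+: t) (h2 : u.toList <+: t) :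
    pvBInner t (L1 ++ u :: L2) = some u := by
  induction L1 with
  | nil => simp [pvBInner, PySem.Chars.startswith_iff, h2]
  | cons sub rest ih =>
    simp only [List.cons_append, pvBInner]
    rw [if_neg, ih (fun x hx => h1 x (by simp [hx]))]
    simp [PySem.Chars.startswith_iff]
    exact h1 sub (by simp)

-- B outer loop characterisations
theorem pvBScan_none (L : List String) : ∀ (t : List Char) (i : Nat),
    (∀ k, pvBInner (t.drop k) L = none) → pvBScan L i t = (-1, none) := by
  intro t
  induction t with
  | nil => intro i _; rfl
  | cons c rest ih =>
    intro i h
    simp only [pvBScan]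
    rw [show pvBInner (c :: rest) L = none from h 0]
    exact ih (i + 1) (fun k => h (k + 1))

theorem pvBScan_hit (L : List String) : ∀ (t : List Char) (i k0 : Nat) (u : String),
    (∀ k < k0, pvBInner (t.drop k) L = none) →
    pvBInner (t.drop k0) L = some u → k0 < t.length →
    pvBScan L i t = (((i + k0 : Nat) : Int), some u) := by
  intro t
  induction t with
  | nil => intro i k0 u _ _ hlt; simp at hlt
  | cons c rest ih =>
    intro i k0 u hbefore hhit hlt
    simp only [pvBScan]
    cases k0 with
    | zero => rw [List.drop_zero] at hhit; rw [hhit]; simp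
    | succ m =>
      rw [show pvBInner (c :: rest) L = none from hbefore 0 (Nat.succ_pos m)]
      have hlt' : m < rest.length := Nat.lt_of_succ_lt_succ hlt
      have hb : ∀ k < m, pvBInner (rest.drop k) L = none := by
        intro k hk
        have := hbefore (k + 1) (Nat.succ_lt_succ hk)
        simpa using this
      have hhit' : pvBInner (List.drop m rest) L = some u := by simpa using hhit
      have := ih (i + 1) m u hb hhit' hlt'
      rw [this, show i + 1 + m = i + (m + 1) from by omega]

-- filtering out empty candidates commutes with pvMin
theorem pvMin_filter (cs : List Char) (L : List String) :
    pvMin cs (L.filter (fun x => !x.toList.isEmpty)) = pvMin cs L := by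
  induction L with
  | nil => rfl
  | cons sub rest ih =>
    by_cases h : sub.toList.isEmpty <;>
      simp [pvMin, h, ih]

-- a match at position j forces find ≥ 0 and find ≤ j
theorem pv_match_find_le (cs sub : List Char) (j : Nat) (h : sub <+: cs.drop j) :
    0 ≤ PySem.Chars.find cs sub ∧ (PySem.Chars.find cs sub).toNat ≤ j := by
  have hin : PySem.Chars.isIn sub cs = true :=
    (PySem.Chars.exists_prefix_drop_iff_isIn sub cs).1 ⟨j, h⟩
  have hnn : 0 ≤ PySem.Chars.find cs sub :=
    (PySem.Chars.find_nonneg_iff cs sub).2 ((PySem.Chars.isIn_iff_infix sub cs).1 hin)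
  refine ⟨hnn, ?_⟩
  by_contra hj
  exact ((PySem.Chars.find_spec hnn).2 j (by omega)) h

theorem pvMin_none_spec (cs : List Char) (L : List String)
    (h : pvMin cs L = none) :
    ∀ sub ∈ L, (!sub.toList.isEmpty) = true → PySem.Chars.find cs sub.toList = -1 := by
  induction L with
  | nil => simp
  | cons sub rest ih =>
    simp only [pvMin] at h
    split_ifs at h with h1 h2
    · intro x hx hne
      rcases List.mem_cons.1 hx with rfl | hx'
      · simp [h1] at hne
      · exact ih h x hx' hne
    · intro x hx hne
      rcases List.mem_cons.1 hx with rfl | hx'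
      · exact h2
      · exact ih h x hx' hne
    · rcases hr : pvMin cs rest with _ | ⟨q', t'⟩ <;> rw [hr] at h <;> dsimp only at h
      · exact absurd h (by simp)
      · split_ifs at h <;> exact absurd h (by simp)

-- pvMin = some (q, t): t matches at q, nothing in L matches earlier, and the
-- candidates before t in L do not match at q either
theorem pvMin_some_spec (cs : List Char) (L : List String) (q : Int) (t : String)
    (h : pvMin cs L = some (q, t)) :
    (∃ L1 L2, L = L1 ++ t :: L2 ∧ (!t.toList.isEmpty) = true ∧
       PySem.Chars.find cs t.toList = q ∧
       ∀ sub ∈ L1, sub.toList.isEmpty = true ∨ PySem.Chars.find cs sub.toList = -1 ∨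
         q < PySem.Chars.find cs sub.toList) ∧
    (∀ sub ∈ L, (!sub.toList.isEmpty) = true →
       PySem.Chars.find cs sub.toList = -1 ∨ q ≤ PySem.Chars.find cs sub.toList) := by
  induction L generalizing q t with
  | nil => simp [pvMin] at h
  | cons sub rest ih =>
    by_cases h1 : sub.toList.isEmpty = true
    · rw [pvMin_cons_empty cs sub rest h1] at h
      obtain ⟨⟨L1, L2, hL, hne, hfind, hbef⟩, hmin⟩ := ih q t h
      refine ⟨⟨sub :: L1, L2, by simp [hL], hne, hfind, ?_⟩, ?_⟩
      · intro x hx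
        rcases List.mem_cons.1 hx with rfl | hx'
        · exact Or.inl h1
        · exact hbef x hx'
      · intro x hx hxe
        rcases List.mem_cons.1 hx with rfl | hx'
        · simp [h1] at hxe
        · exact hmin x hx' hxe
    · by_cases h2 : PySem.Chars.find cs sub.toList = -1
      · rw [pvMin_cons_notfound cs sub rest h1 h2] at h
        obtain ⟨⟨L1, L2, hL, hne, hfind, hbef⟩, hmin⟩ := ih q t h
        refine ⟨⟨sub :: L1, L2, by simp [hL], hne, hfind, ?_⟩, ?_⟩
        · intro x hx
          rcases List.mem_cons.1 hx with rfl | hx'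
          · exact Or.inr (Or.inl h2)
          · exact hbef x hx'
        · intro x hx hxe
          rcases List.mem_cons.1 hx with rfl | hx'
          · exact Or.inl h2
          · exact hmin x hx' hxe
      · have hp0 : 0 ≤ PySem.Chars.find cs sub.toList := by
          have := PySem.Chars.neg_one_le_find cs sub.toList; omega
        rw [pvMin_cons_found cs sub rest h1 h2] at h
        rcases hr : pvMin cs rest with _ | ⟨q', t'⟩ <;> rw [hr] at h <;> dsimp only at h
        · simp only [Option.some.injEq, Prod.mk.injEq] at h
          obtain ⟨rfl, rfl⟩ := h
          refine ⟨⟨[], rest, rfl, by simpa using h1, rfl, by simp⟩, ?_⟩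
          intro x hx hxe
          rcases List.mem_cons.1 hx with rfl | hx'
          · exact Or.inr le_rfl
          · exact Or.inl (pvMin_none_spec cs rest hr x hx' hxe)
        · have hq' := pvMin_nonneg cs rest q' t' hr
          obtain ⟨⟨L1, L2, hL, hne, hfind, hbef⟩, hmin⟩ := ih q' t' hr
          by_cases h5 : PySem.Chars.find cs sub.toList ≤ q'
          · rw [if_pos h5] at h
            simp only [Option.some.injEq, Prod.mk.injEq] at h
            obtain ⟨rfl, rfl⟩ := h
            refine ⟨⟨[], rest, rfl, by simpa using h1, rfl, by simp⟩, ?_⟩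
            intro x hx hxe
            rcases List.mem_cons.1 hx with rfl | hx'
            · exact Or.inr le_rfl
            · rcases hmin x hx' hxe with hm | hm
              · exact Or.inl hm
              · exact Or.inr (le_trans h5 hm)
          · rw [if_neg h5] at h
            simp only [Option.some.injEq, Prod.mk.injEq] at h
            obtain ⟨rfl, rfl⟩ := h
            refine ⟨⟨sub :: L1, L2, by simp [hL], hne, hfind, ?_⟩, ?_⟩
            · intro x hx
              rcases List.mem_cons.1 hx with rfl | hx'
              · exact Or.inr (Or.inr (by omega))
              · exact hbef x hx'
            · intro x hx hxe
              rcases List.mem_cons.1 hx with rfl | hx'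
              · exact Or.inr (by omega)
              · exact hmin x hx' hxe

-- ===== VERDICT (by name: the statement is the Claim_ definition above) =====
-- helper facts for the main proof
theorem pv_no_match_of_find_neg (cs : List Char) (sub : String) (k : Nat)
    (h : PySem.Chars.find cs sub.toList = -1) : ¬ sub.toList <+: cs.drop k := by
  intro hm
  have := (pv_match_find_le cs sub.toList k hm).1
  omega

theorem findSmallestPositionAmongSustrings_spec : Claim_equal_findSmallestPositionAmongSustrings := by
  intro subs s _
  unfold Spec_findSmallestPositionAmongSustrings
  unfold findSmallestPositionAmongSustrings findSmallestPositionAmongSustrings_alt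
  set cs := s.toList with hcs
  set LF := subs.filter (fun x => !x.toList.isEmpty) with hLF
  have hLFmem : ∀ x ∈ LF, x ∈ subs ∧ (!x.toList.isEmpty) = true := by
    intro x hx; exact ⟨(List.mem_filter.1 hx).1, (List.mem_filter.1 hx).2⟩
  by_cases hg : (subs.isEmpty || cs.isEmpty) = true
  · rw [if_pos hg]
    rcases Bool.or_eq_true_iff.1 hg with hsub | hs
    · have : LF = [] := by rw [hLF, List.isEmpty_iff.1 hsub]; rfl
      rw [this, pvBScan_none [] cs 0 (fun k => rfl)]
    · rw [List.isEmpty_iff.1 hs]; rfl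
  · rw [if_neg hg]
    rw [pvALoop_start cs subs]
    have hmF : pvMin cs LF = pvMin cs subs := pvMin_filter cs subs
    rcases hm : pvMin cs subs with _ | ⟨q, t⟩
    · rw [pvBScan_none LF cs 0 ?_]
      intro k
      apply pvBInner_eq_none
      intro sub hsub
      obtain ⟨hs1, hs2⟩ := hLFmem sub hsub
      exact pv_no_match_of_find_neg cs sub k
        (pvMin_none_spec cs subs hm sub hs1 hs2)
    · have hq0 : 0 ≤ q := pvMin_nonneg cs subs q t hm
      obtain ⟨⟨L1, L2, hL, hne, hfind, hbef⟩, hmin⟩ :=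
        pvMin_some_spec cs LF q t (by rw [hmF, hm])
      have htm : t.toList <+: cs.drop q.toNat := by
        have := (PySem.Chars.find_spec (s := cs) (sub := t.toList) (by omega)).1
        rwa [hfind] at this
      have hL1 : ∀ x ∈ L1, ¬ x.toList <+: cs.drop q.toNat := by
        intro x hx hmatch
        have hxLF : x ∈ LF := by rw [hL]; simp [hx]
        obtain ⟨_, hxe⟩ := hLFmem x hxLF
        rcases hbef x hx with he | hf | hgt
        · simp [he] at hxe
        · exact pv_no_match_of_find_neg cs x q.toNat hf hmatch
        · have := pv_match_find_le cs x.toList q.toNat hmatch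
          omega
      have hhit : pvBInner (cs.drop q.toNat) LF = some t := by
        rw [hL]; exact pvBInner_first (cs.drop q.toNat) L1 L2 t hL1 htm
      have hbeforek : ∀ k < q.toNat, pvBInner (cs.drop k) LF = none := by
        intro k hk
        apply pvBInner_eq_none
        intro x hx hmatch
        obtain ⟨hx1, hxe⟩ := hLFmem x hx
        rcases hmin x hx hxe with hf | hle
        · exact pv_no_match_of_find_neg cs x k hf hmatch
        · have := pv_match_find_le cs x.toList k hmatch
          omega
      have hlen : q.toNat < cs.length := by
        by_contra hcon
        have hdrop : cs.drop q.toNat = [] := List.drop_eq_nil_of_le (by omega)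
        rw [hdrop] at htm
        have := List.prefix_nil.1 htm
        simp [this] at hne
      rw [pvBScan_hit LF cs 0 q.toNat t hbeforek hhit hlen]
      simp only [Nat.zero_add]
      rw [Int.toNat_of_nonneg hq0]
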